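-- pv_equiv track=rewrite | github.com/lxa2015/lxa-py | manifold_module.py | compute_WordToSharedContextsOfNeighbors
-- ===== SOURCE A (Python) =====
-- def compute_WordToSharedContextsOfNeighbors(nWordsForAnalysis, WordToContexts,
--                                         WordToNeighbors, ContextToWords,
--                                         nNeighbors, mincontexts):
--
--     WordToSharedContextsOfNeighbors = dict()
--
--     for word_no in range(nWordsForAnalysis):
--         WordToSharedContextsOfNeighbors[word_no] = dict()
--
--         neighbor_no_list = WordToNeighbors[word_no] # list of neighbor indices
--
--         for context_no in WordToContexts[word_no].keys():
--             WordToSharedContextsOfNeighbors[word_no][context_no] = list()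
--
--             for neighbor_no in neighbor_no_list:
--                 if neighbor_no in ContextToWords[context_no]:
--                     WordToSharedContextsOfNeighbors[word_no][context_no].append(neighbor_no)
--
--             if len(WordToSharedContextsOfNeighbors[word_no][context_no]) < mincontexts:
--                 del WordToSharedContextsOfNeighbors[word_no][context_no]
--
--     ImportantContextToWords = dict()
--     for word_no in range(nWordsForAnalysis):
--         for context_no in WordToSharedContextsOfNeighbors[word_no].keys():
--             NumberOfTimesThisWordOccursInThisContext = ContextToWords[context_no][word_no]
--             if NumberOfTimesThisWordOccursInThisContext >= mincontexts:
--                 if context_no not in ImportantContextToWords: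
--                     ImportantContextToWords[context_no] = dict()
--
--                 ImportantContextToWords[context_no][word_no] = NumberOfTimesThisWordOccursInThisContext
--
--     return (WordToSharedContextsOfNeighbors, ImportantContextToWords)
-- ===== SOURCE B (Python) =====
-- def compute_WordToSharedContextsOfNeighbors(nWordsForAnalysis, WordToContexts,
--                                         WordToNeighbors, ContextToWords,
--                                         nNeighbors, mincontexts):
--     # Inverted-index algorithm: precompute, once, for every word the ordered set
--     # of contexts whose ContextToWords row contains it; then, per word, scatter
--     # its neighbors into per-context buckets by walking the neighbor list once
--     # (neighbor-outer loop over the inverted index) instead of probing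
--     # ContextToWords membership for every (context, neighbor) pair.
--     ctx_of = {}  # word -> dict of contexts (dict used as an ordered set)
--     for c, words in ContextToWords.items():
--         for wd in words:
--             ctx_of.setdefault(wd, {})[c] = None
--
--     WordToSharedContextsOfNeighbors = {}
--     for w in range(nWordsForAnalysis):
--         wtc = WordToContexts[w]
--         pairs = [(c, nb) for nb in WordToNeighbors[w]
--                  for c in ctx_of.get(nb, ()) if c in wtc]
--         acc = {}
--         for c, nb in pairs:
--             acc.setdefault(c, []).append(nb)
--         row = {}
--         for c in wtc:
--             lst = acc.get(c, [])
--             if len(lst) >= mincontexts: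
--                 row[c] = lst
--         WordToSharedContextsOfNeighbors[w] = row
--
--     ImportantContextToWords = {}
--     for w in range(nWordsForAnalysis):
--         for c in WordToSharedContextsOfNeighbors[w]:
--             cnt = ContextToWords[c][w]
--             if cnt >= mincontexts:
--                 ImportantContextToWords.setdefault(c, {})[w] = cnt
--
--     return (WordToSharedContextsOfNeighbors, ImportantContextToWords)
-- ===== Notes on version B (the rewrite author's own statement) =====
-- stated objective: alternative
-- what changed: B replaces A's per-(context,neighbor) membership probing with an inverted index built once from ContextToWords (word -> ordered set of contexts containing it); each word's shared lists are then produced by a neighbor-outer scatter into per-context buckets and assembled in WordToContexts key order, instead of A's context-outer append-then-delete scan.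
import Mathlib
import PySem

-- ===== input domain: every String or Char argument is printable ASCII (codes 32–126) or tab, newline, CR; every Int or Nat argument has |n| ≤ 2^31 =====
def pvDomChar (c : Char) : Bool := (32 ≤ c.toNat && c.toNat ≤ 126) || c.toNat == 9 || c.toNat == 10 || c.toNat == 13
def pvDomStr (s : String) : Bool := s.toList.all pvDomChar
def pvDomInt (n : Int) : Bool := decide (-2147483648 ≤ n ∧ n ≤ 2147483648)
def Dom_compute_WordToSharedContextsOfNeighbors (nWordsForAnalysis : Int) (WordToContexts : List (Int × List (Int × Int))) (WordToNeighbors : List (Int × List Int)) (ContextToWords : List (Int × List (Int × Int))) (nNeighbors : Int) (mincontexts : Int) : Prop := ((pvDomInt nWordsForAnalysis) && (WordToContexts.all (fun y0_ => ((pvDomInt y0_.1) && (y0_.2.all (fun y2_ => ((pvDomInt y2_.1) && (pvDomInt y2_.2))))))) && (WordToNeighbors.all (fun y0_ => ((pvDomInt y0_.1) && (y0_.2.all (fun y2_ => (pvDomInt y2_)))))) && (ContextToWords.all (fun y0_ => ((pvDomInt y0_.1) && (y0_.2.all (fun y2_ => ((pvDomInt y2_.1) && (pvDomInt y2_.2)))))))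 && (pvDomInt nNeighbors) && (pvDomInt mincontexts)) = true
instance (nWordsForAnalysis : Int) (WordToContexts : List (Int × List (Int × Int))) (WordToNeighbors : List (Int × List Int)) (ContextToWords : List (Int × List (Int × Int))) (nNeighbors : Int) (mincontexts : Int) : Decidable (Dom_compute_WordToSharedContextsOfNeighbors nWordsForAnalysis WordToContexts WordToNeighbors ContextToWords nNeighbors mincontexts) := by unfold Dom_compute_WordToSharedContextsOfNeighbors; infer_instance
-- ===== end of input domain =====

-- B replaces A's per-(context, neighbor) membership probing with an inverted
-- index (word -> ordered set of contexts containing it) built once from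
-- ContextToWords; each word's shared lists are produced by a neighbor-outer
-- scatter into per-context buckets and assembled in WordToContexts key order.

-- shared type-convention marshalling: a Python dict-of-dicts argument as a PySem.Dict
def pvToD2 (l : List (Int × List (Int × Int))) : PySem.Dict Int (PySem.Dict Int Int) :=
  PySem.Dict.ofList (l.map (fun p => (p.1, PySem.Dict.ofList p.2)))

-- ===== PORT A =====
-- body of A's inner 'for context_no in WordToContexts[word_no].keys()' loop
def pvAstepCtx (ctwd : PySem.Dict Int (PySem.Dict Int Int)) (nbs : List Int) (minc w : Int)
    (W : PySem.Dict Int (PySem.Dict Int (List Int))) (c : Int) : PySem.Dict Int (PySem.Dict Int (List Int)) :=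
  let W1 := W.modify w PySem.Dict.empty (fun row => row.insert c [])
  let W2 := nbs.foldl (fun W nb =>
      if (ctwd.getD c PySem.Dict.empty).contains nb then
        W.modify w PySem.Dict.empty (fun row => row.modify c [] (fun l => l ++ [nb]))
      else W) W1
  if (((W2.getD w PySem.Dict.empty).getD c []).length : Int) < minc then
    W2.modify w PySem.Dict.empty (fun row => row.erase c)
  else W2

-- body of A's first 'for word_no in range(nWordsForAnalysis)' loop
def pvAstepWord (wtcd ctwd : PySem.Dict Int (PySem.Dict Int Int)) (wtnd : PySem.Dict Int (List Int)) (minc : Int)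
    (W : PySem.Dict Int (PySem.Dict Int (List Int))) (w : Int) : PySem.Dict Int (PySem.Dict Int (List Int)) :=
  let W1 := W.insert w PySem.Dict.empty
  let nbs := wtnd.getD w []
  ((wtcd.getD w PySem.Dict.empty).keys).foldl (pvAstepCtx ctwd nbs minc w) W1

-- body of A's second pass over one surviving context
def pvAstepImp (ctwd : PySem.Dict Int (PySem.Dict Int Int)) (minc w : Int)
    (I : PySem.Dict Int (PySem.Dict Int Int)) (c : Int) : PySem.Dict Int (PySem.Dict Int Int) :=
  let cnt := (ctwd.getD c PySem.Dict.empty).getD w 0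
  if minc ≤ cnt then
    let I1 := if I.contains c = false then I.insert c PySem.Dict.empty else I
    I1.modify c PySem.Dict.empty (fun row => row.insert w cnt)
  else I

def compute_WordToSharedContextsOfNeighbors (nWordsForAnalysis : Int) (WordToContexts : List (Int × List (Int × Int))) (WordToNeighbors : List (Int × List Int)) (ContextToWords : List (Int × List (Int × Int))) (nNeighbors : Int) (mincontexts : Int) : (List (Int × List (Int × List Int))) × (List (Int × List (Int × Int))) :=
  let wtcd := pvToD2 WordToContexts
  let wtnd : PySem.Dict Int (List Int) := PySem.Dict.ofList WordToNeighbors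
  let ctwd := pvToD2 ContextToWords
  let W := (PySem.List.pyRange 0 nWordsForAnalysis 1).foldl (pvAstepWord wtcd ctwd wtnd mincontexts) PySem.Dict.empty
  let I := (PySem.List.pyRange 0 nWordsForAnalysis 1).foldl
      (fun I w => ((W.getD w PySem.Dict.empty).keys).foldl (pvAstepImp ctwd mincontexts w) I) PySem.Dict.empty
  (W.items.map (fun p => (p.1, p.2.items)), I.items.map (fun p => (p.1, p.2.items)))

-- ===== PORT B =====
-- inverted index 'ctx_of': for c, words in ContextToWords.items(): for wd in words:
-- ctx_of.setdefault(wd, {})[c] = None  (the None payload carries no information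
-- and is ported as the Int 0; setdefault-then-item-assignment is Dict.modify)
def pvInv (ctwd : PySem.Dict Int (PySem.Dict Int Int)) : PySem.Dict Int (PySem.Dict Int Int) :=
  ctwd.items.foldl (fun inv p =>
    p.2.keys.foldl (fun inv wd => inv.modify wd PySem.Dict.empty (fun s => s.insert p.1 0)) inv)
    PySem.Dict.empty

-- '[(c, nb) for nb in WordToNeighbors[w] for c in ctx_of.get(nb, ()) if c in wtc]'
def pvPairs (inv : PySem.Dict Int (PySem.Dict Int Int)) (wtc : PySem.Dict Int Int) (nbs : List Int) : List (Int × Int) :=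
  nbs.flatMap (fun nb =>
    (((inv.getD nb PySem.Dict.empty).keys).filter (fun c => wtc.contains c)).map (fun c => (c, nb)))

-- one word's row: scatter the pairs into per-context buckets
-- ('acc.setdefault(c, []).append(nb)' is Dict.modify c [] (· ++ [nb])),
-- then keep, in WordToContexts[w] key order, the buckets that are long enough
def pvRowB (inv : PySem.Dict Int (PySem.Dict Int Int)) (wtc : PySem.Dict Int Int) (nbs : List Int) (minc : Int) :
    PySem.Dict Int (List Int) :=
  let acc := (pvPairs inv wtc nbs).foldl (fun d p => d.modify p.1 [] (fun l => l ++ [p.2])) PySem.Dict.empty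
  wtc.keys.foldl (fun row c =>
    let lst := acc.getD c []
    if minc ≤ (lst.length : Int) then row.insert c lst else row) PySem.Dict.empty

-- body of B's second pass: 'ImportantContextToWords.setdefault(c, {})[w] = cnt'
def pvBstepImp (ctwd : PySem.Dict Int (PySem.Dict Int Int)) (minc w : Int)
    (I : PySem.Dict Int (PySem.Dict Int Int)) (c : Int) : PySem.Dict Int (PySem.Dict Int Int) :=
  let cnt := (ctwd.getD c PySem.Dict.empty).getD w 0
  if minc ≤ cnt then (I.setdefault c PySem.Dict.empty).modify c PySem.Dict.empty (fun d => d.insert w cnt)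
  else I

def compute_WordToSharedContextsOfNeighbors_alt (nWordsForAnalysis : Int) (WordToContexts : List (Int × List (Int × Int))) (WordToNeighbors : List (Int × List Int)) (ContextToWords : List (Int × List (Int × Int))) (nNeighbors : Int) (mincontexts : Int) : (List (Int × List (Int × List Int))) × (List (Int × List (Int × Int))) :=
  let wtcd := pvToD2 WordToContexts
  let wtnd : PySem.Dict Int (List Int) := PySem.Dict.ofList WordToNeighbors
  let ctwd := pvToD2 ContextToWords
  let inv := pvInv ctwd
  let S := (PySem.List.pyRange 0 nWordsForAnalysis 1).foldl
      (fun S w => S.insert w (pvRowB inv (wtcd.getD w PySem.Dict.empty) (wtnd.getD w []) mincontexts))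
      PySem.Dict.empty
  let I := (PySem.List.pyRange 0 nWordsForAnalysis 1).foldl
      (fun I w => ((S.getD w PySem.Dict.empty).keys).foldl (pvBstepImp ctwd mincontexts w) I) PySem.Dict.empty
  (S.items.map (fun p => (p.1, p.2.items)), I.items.map (fun p => (p.1, p.2.items)))

-- ===== PRECONDITION & SPEC =====
-- Pre_ = exactly the inputs where Python A raises no KeyError: every word_no of the
-- range is a key of WordToNeighbors and WordToContexts; each of its contexts is a key
-- of ContextToWords (unless the neighbor list is empty and mincontexts > 0, in which
-- case that context is deleted untouched); and whenever a context survives the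
-- mincontexts test, word_no is a key of ContextToWords[context_no]. Stated as a
-- short-circuit Bool check; the leading length bound is implied by the per-word key
-- requirement and only lets the check fail fast on a huge word range.
def Pre_compute_WordToSharedContextsOfNeighbors (nWordsForAnalysis : Int) (WordToContexts : List (Int × List (Int × Int))) (WordToNeighbors : List (Int × List Int)) (ContextToWords : List (Int × List (Int × Int))) (nNeighbors : Int) (mincontexts : Int) : Prop :=
  (decide (nWordsForAnalysis ≤ (WordToNeighbors.length : Int)) &&
   (PySem.List.pyRange 0 nWordsForAnalysis 1).all (fun w =>
     (PySem.Dict.ofList WordToNeighbors : PySem.Dict Int (List Int)).contains w &&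
     (pvToD2 WordToContexts).contains w &&
     ((pvToD2 WordToContexts).getD w PySem.Dict.empty).keys.all (fun c =>
       match (pvToD2 ContextToWords).get? c with
       | some d =>
         !decide (mincontexts ≤ ((((PySem.Dict.ofList WordToNeighbors : PySem.Dict Int (List Int)).getD w []).filter
             (fun x => d.contains x)).length : Int)) || d.contains w
       | none =>
         decide ((PySem.Dict.ofList WordToNeighbors : PySem.Dict Int (List Int)).getD w [] = []) &&
         decide (0 < mincontexts)))) = true

instance (nWordsForAnalysis : Int) (WordToContexts : List (Int × List (Int × Int))) (WordToNeighbors : List (Int × List Int)) (ContextToWords : List (Int × List (Int × Int))) (nNeighbors : Int) (mincontexts : Int) : Decidable (Pre_compute_WordToSharedContextsOfNeighbors nWordsForAnalysis WordToContexts WordToNeighbors ContextToWords nNeighbors mincontexts) := by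
  unfold Pre_compute_WordToSharedContextsOfNeighbors; infer_instance

def pvWitness_compute_WordToSharedContextsOfNeighbors : Int × (List (Int × List (Int × Int))) × (List (Int × List Int)) × (List (Int × List (Int × Int))) × Int × Int :=
  (1, [(0, [(0, 1)])], [(0, [0])], [(0, [(0, 1)])], 1, 1)

def Spec_compute_WordToSharedContextsOfNeighbors (nWordsForAnalysis : Int) (WordToContexts : List (Int × List (Int × Int))) (WordToNeighbors : List (Int × List Int)) (ContextToWords : List (Int × List (Int × Int))) (nNeighbors : Int) (mincontexts : Int) (out : (List (Int × List (Int × List Int))) × (List (Int × List (Int × Int)))) : Prop :=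
  out = compute_WordToSharedContextsOfNeighbors_alt nWordsForAnalysis WordToContexts WordToNeighbors ContextToWords nNeighbors mincontexts

instance (nWordsForAnalysis : Int) (WordToContexts : List (Int × List (Int × Int))) (WordToNeighbors : List (Int × List Int)) (ContextToWords : List (Int × List (Int × Int))) (nNeighbors : Int) (mincontexts : Int) (out : (List (Int × List (Int × List Int))) × (List (Int × List (Int × Int)))) : Decidable (Spec_compute_WordToSharedContextsOfNeighbors nWordsForAnalysis WordToContexts WordToNeighbors ContextToWords nNeighbors mincontexts out) := by
  unfold Spec_compute_WordToSharedContextsOfNeighbors; infer_instance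

-- ===== CLAIM =====
def Claim_equal_compute_WordToSharedContextsOfNeighbors : Prop := ∀ (nWordsForAnalysis : Int) (WordToContexts : List (Int × List (Int × Int))) (WordToNeighbors : List (Int × List Int)) (ContextToWords : List (Int × List (Int × Int))) (nNeighbors : Int) (mincontexts : Int), Dom_compute_WordToSharedContextsOfNeighbors nWordsForAnalysis WordToContexts WordToNeighbors ContextToWords nNeighbors mincontexts → Pre_compute_WordToSharedContextsOfNeighbors nWordsForAnalysis WordToContexts WordToNeighbors ContextToWords nNeighbors mincontexts → Spec_compute_WordToSharedContextsOfNeighbors nWordsForAnalysis WordToContexts WordToNeighbors ContextToWords nNeighbors mincontexts (compute_WordToSharedContextsOfNeighbors nWordsForAnalysis WordToContexts WordToNeighbors ContextToWords nNeighbors mincontexts)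

-- ===== LEMMAS AND PROOFS =====

-- the canonical matched-neighbor list of word w at context c
def pvMatched (ctwd : PySem.Dict Int (PySem.Dict Int Int)) (nbs : List Int) (c : Int) : List Int :=
  nbs.filter (fun nb => (ctwd.getD c PySem.Dict.empty).contains nb)

-- proof-side view of one A context step: keep the context iff its matched list is long enough
def pvRowStep (ctwd : PySem.Dict Int (PySem.Dict Int Int)) (nbs : List Int) (minc : Int)
    (r : PySem.Dict Int (List Int)) (c : Int) : PySem.Dict Int (List Int) :=
  if minc ≤ ((pvMatched ctwd nbs c).length : Int) then r.insert c (pvMatched ctwd nbs c) else r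

-- the row a given word ends up with
def pvRowOf (wtcd ctwd : PySem.Dict Int (PySem.Dict Int Int)) (wtnd : PySem.Dict Int (List Int)) (minc : Int)
    (w : Int) : PySem.Dict Int (List Int) :=
  ((wtcd.getD w PySem.Dict.empty).keys).foldl (pvRowStep ctwd (wtnd.getD w []) minc) PySem.Dict.empty

theorem pv_modify_insert_self {κ ν : Type} [BEq κ] [LawfulBEq κ]
    (W : PySem.Dict κ ν) (w : κ) (r d0 : ν) (f : ν → ν) :
    (W.insert w r).modify w d0 f = W.insert w (f r) := by
  simp [PySem.Dict.modify, PySem.Dict.getD_insert_self, PySem.Dict.insert_insert_self]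

theorem pv_erase_insert {κ ν : Type} [BEq κ] [LawfulBEq κ] (d : PySem.Dict κ ν) (k : κ) (v : ν)
    (h : d.contains k = false) : (d.insert k v).erase k = d := by
  cases d with
  | mk items =>
    simp only [PySem.Dict.contains] at h
    simp only [PySem.Dict.insert, PySem.Dict.contains, h, if_neg Bool.false_ne_true,
      PySem.Dict.erase, List.filter_append]
    have h2 : ∀ p ∈ items, (!(p.1 == k)) = true := by
      intro p hp
      have := List.any_eq_false.mp h p hp
      simpa using this
    simp [List.filter_eq_self.mpr h2]

theorem pv_fill (p : Int → Bool) (W : PySem.Dict Int (PySem.Dict Int (List Int))) (w c : Int)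
    (r : PySem.Dict Int (List Int)) :
    ∀ (nbs : List Int) (l0 : List Int),
    nbs.foldl (fun W nb => if p nb then
        W.modify w PySem.Dict.empty (fun row => row.modify c [] (fun l => l ++ [nb])) else W)
      (W.insert w (r.insert c l0))
    = W.insert w (r.insert c (l0 ++ nbs.filter p)) := by
  intro nbs
  induction nbs with
  | nil => intro l0; simp
  | cons nb nbs ih =>
    intro l0
    simp only [List.foldl_cons, List.filter_cons]
    by_cases h : p nb
    · rw [if_pos h, pv_modify_insert_self, pv_modify_insert_self, ih (l0 ++ [nb])]
      simp [h]
    · rw [if_neg h, ih l0]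
      simp [h]

theorem pv_Astep_eq (ctwd : PySem.Dict Int (PySem.Dict Int Int)) (nbs : List Int) (minc w : Int)
    (W : PySem.Dict Int (PySem.Dict Int (List Int))) (r : PySem.Dict Int (List Int)) (c : Int)
    (hc : r.contains c = false) :
    pvAstepCtx ctwd nbs minc w (W.insert w r) c = W.insert w (pvRowStep ctwd nbs minc r c) := by
  simp only [pvAstepCtx]
  rw [pv_modify_insert_self, pv_fill]
  simp only [List.nil_append]
  have hm : pvMatched ctwd nbs c = nbs.filter (fun nb => (ctwd.getD c PySem.Dict.empty).contains nb) := rfl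
  rw [← hm, PySem.Dict.getD_insert_self, PySem.Dict.getD_insert_self]
  unfold pvRowStep
  by_cases hlt : ((pvMatched ctwd nbs c).length : Int) < minc
  · rw [if_pos hlt, pv_modify_insert_self, if_neg (by omega)]
    rw [pv_erase_insert r c _ hc]
  · rw [if_neg hlt, if_pos (by omega)]

theorem pv_foldA (ctwd : PySem.Dict Int (PySem.Dict Int Int)) (nbs : List Int) (minc w : Int) :
    ∀ (ctxs : List Int) (W : PySem.Dict Int (PySem.Dict Int (List Int))) (r : PySem.Dict Int (List Int)),
    ctxs.Nodup → (∀ c ∈ ctxs, r.contains c = false) →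
    ctxs.foldl (pvAstepCtx ctwd nbs minc w) (W.insert w r)
      = W.insert w (ctxs.foldl (pvRowStep ctwd nbs minc) r) := by
  intro ctxs
  induction ctxs with
  | nil => intro W r _ _; simp
  | cons c ctxs ih =>
    intro W r hnd hfresh
    simp only [List.foldl_cons]
    rw [pv_Astep_eq ctwd nbs minc w W r c (hfresh c (List.mem_cons_self ..))]
    apply ih W (pvRowStep ctwd nbs minc r c) (List.nodup_cons.mp hnd).2
    intro c' hc'
    have hne : c' ≠ c := fun h => (List.nodup_cons.mp hnd).1 (h ▸ hc')
    unfold pvRowStep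
    split
    · rw [PySem.Dict.contains_insert]
      simp [hne, hfresh c' (List.mem_cons_of_mem c hc')]
    · exact hfresh c' (List.mem_cons_of_mem c hc')

theorem pv_setdefault_eq {κ ν : Type} [BEq κ] [LawfulBEq κ] (I : PySem.Dict κ ν) (c : κ) (v : ν) :
    I.setdefault c v = if I.contains c = false then I.insert c v else I := by
  by_cases h : I.contains c
  · rw [PySem.Dict.setdefault_of_contains I v h, if_neg (by simp [h])]
  · rw [PySem.Dict.setdefault_of_not_contains I v (by simpa using h), if_pos (by simpa using h)]

theorem pv_get?_fold_insert_prop {κ ν : Type} [BEq κ] [LawfulBEq κ] [DecidableEq κ] (P : ν → Prop) :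
    ∀ (ps : List (κ × ν)) (d : PySem.Dict κ ν),
    (∀ p ∈ ps, P p.2) → (∀ k v, d.get? k = some v → P v) →
    ∀ k v, (ps.foldl (fun acc p => acc.insert p.1 p.2) d).get? k = some v → P v := by
  intro ps
  induction ps with
  | nil => intro d _ hd k v h; exact hd k v h
  | cons p ps ih =>
    intro d hps hd k v h
    refine ih (d.insert p.1 p.2) (fun q hq => hps q (List.mem_cons_of_mem p hq)) ?_ k v h
    intro k' v' h'
    rw [PySem.Dict.get?_insert] at h'
    split at h'
    · cases h'; exact hps p (List.mem_cons_self ..)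
    · exact hd k' v' h'

theorem pv_nodup_inner (l : List (Int × List (Int × Int))) (k : Int) :
    ((pvToD2 l).getD k PySem.Dict.empty).keys.Nodup := by
  have hP : ∀ v, (pvToD2 l).get? k = some v → v.keys.Nodup := by
    intro v hv
    unfold pvToD2 PySem.Dict.ofList PySem.Dict.update at hv
    refine pv_get?_fold_insert_prop (fun d => d.keys.Nodup) _ PySem.Dict.empty ?_ ?_ k v hv
    · intro p hp
      rcases List.mem_map.mp hp with ⟨q, _, rfl⟩
      exact PySem.Dict.nodup_keys_ofList q.2
    · intro k' v' h'
      simp [PySem.Dict.get?_empty] at h'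
  rw [PySem.Dict.getD_eq_get?_getD]
  cases h : (pvToD2 l).get? k with
  | none => simp [PySem.Dict.keys_empty]
  | some v => simpa using hP v h

theorem pv_pass1_eq (wtcd ctwd : PySem.Dict Int (PySem.Dict Int Int)) (wtnd : PySem.Dict Int (List Int))
    (minc : Int) (hctx : ∀ w, ((wtcd.getD w PySem.Dict.empty).keys).Nodup)
    (ws : List Int) (S : PySem.Dict Int (PySem.Dict Int (List Int))) :
    ws.foldl (pvAstepWord wtcd ctwd wtnd minc) S
      = ws.foldl (fun S w => S.insert w (pvRowOf wtcd ctwd wtnd minc w)) S := by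
  apply PySem.List.foldl_congr_mem
  intro S w _
  unfold pvAstepWord pvRowOf
  rw [pv_foldA ctwd (wtnd.getD w []) minc w _ S PySem.Dict.empty (hctx w)
    (fun c _ => PySem.Dict.contains_empty c)]

-- ===== B-side lemmas: the inverted index =====

-- every value of the inverted index has unique keys
theorem pv_inv_inner_nodup_step (inv : PySem.Dict Int (PySem.Dict Int Int)) (wd c : Int)
    (h : ∀ nb, (((inv.getD nb PySem.Dict.empty)).keys).Nodup) :
    ∀ nb, ((((inv.modify wd PySem.Dict.empty (fun s => s.insert c 0)).getD nb PySem.Dict.empty)).keys).Nodup := by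
  intro nb
  rw [PySem.Dict.getD_modify]
  split
  · exact PySem.Dict.nodup_keys_insert _ _ _ (h wd)
  · exact h nb

theorem pv_inv_inner_nodup_fold (c : Int) :
    ∀ (wds : List Int) (inv : PySem.Dict Int (PySem.Dict Int Int)),
    (∀ nb, (((inv.getD nb PySem.Dict.empty)).keys).Nodup) →
    ∀ nb, ((((wds.foldl (fun inv wd => inv.modify wd PySem.Dict.empty (fun s => s.insert c 0)) inv).getD nb PySem.Dict.empty)).keys).Nodup := by
  intro wds
  induction wds with
  | nil => intro inv h nb; exact h nb
  | cons wd wds ih =>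
    intro inv h nb
    exact ih _ (pv_inv_inner_nodup_step inv wd c h) nb

theorem pv_inv_nodup (ctwd : PySem.Dict Int (PySem.Dict Int Int)) :
    ∀ nb, (((pvInv ctwd).getD nb PySem.Dict.empty).keys).Nodup := by
  unfold pvInv
  generalize ctwd.items = items
  have hgen : ∀ (l : List (Int × PySem.Dict Int Int)) (inv : PySem.Dict Int (PySem.Dict Int Int)),
      (∀ nb, (((inv.getD nb PySem.Dict.empty)).keys).Nodup) →
      ∀ nb, (((l.foldl (fun inv p => p.2.keys.foldl
          (fun inv wd => inv.modify wd PySem.Dict.empty (fun s => s.insert p.1 0)) inv) inv).getD nb PySem.Dict.empty).keys).Nodup := by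
    intro l
    induction l with
    | nil => intro inv h nb; exact h nb
    | cons p l ih =>
      intro inv h nb
      exact ih _ (pv_inv_inner_nodup_fold p.1 p.2.keys inv h) nb
  intro nb
  exact hgen items PySem.Dict.empty (by intro nb; simp [PySem.Dict.getD_empty, PySem.Dict.keys_empty]) nb

-- membership in the inverted index, inner loop
theorem pv_inv_inner_contains (c' : Int) :
    ∀ (wds : List Int) (inv : PySem.Dict Int (PySem.Dict Int Int)) (nb c : Int),
    (((wds.foldl (fun inv wd => inv.modify wd PySem.Dict.empty (fun s => s.insert c' 0)) inv).getD nb PySem.Dict.empty).contains c)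
      = (((inv.getD nb PySem.Dict.empty).contains c) || (c == c' && wds.any (fun wd => wd == nb))) := by
  intro wds
  induction wds with
  | nil => intro inv nb c; simp
  | cons wd wds ih =>
    intro inv nb c
    simp only [List.foldl_cons, List.any_cons]
    rw [ih]
    rw [PySem.Dict.getD_modify]
    by_cases hw : nb = wd
    · subst hw
      rw [if_pos rfl, PySem.Dict.contains_insert]
      cases hc : (c == c') <;> simp
    · rw [if_neg hw]
      have hwb : (wd == nb) = false := by simp; exact fun h => hw h.symm
      rw [hwb]
      simp

-- membership in the inverted index, outer loop
theorem pv_inv_contains_fold :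
    ∀ (items : List (Int × PySem.Dict Int Int)) (inv : PySem.Dict Int (PySem.Dict Int Int)) (nb c : Int),
    (((items.foldl (fun inv p => p.2.keys.foldl
        (fun inv wd => inv.modify wd PySem.Dict.empty (fun s => s.insert p.1 0)) inv) inv).getD nb PySem.Dict.empty).contains c)
      = (((inv.getD nb PySem.Dict.empty).contains c) || items.any (fun p => p.1 == c && p.2.contains nb)) := by
  intro items
  induction items with
  | nil => intro inv nb c; simp
  | cons p items ih =>
    intro inv nb c
    simp only [List.foldl_cons, List.any_cons]
    rw [ih, pv_inv_inner_contains]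
    have hk : p.2.keys.any (fun wd => wd == nb) = p.2.contains nb := by
      simp only [PySem.Dict.keys, PySem.Dict.contains, List.any_map]
      rfl
    have hcomm : (c == p.1) = (p.1 == c) := by simp [eq_comm]
    rw [hk, hcomm]
    cases h1 : (inv.getD nb PySem.Dict.empty).contains c <;> simp

-- an association list with unique keys: 'some pair with key c satisfies q' is a lookup
theorem pv_any_eq_getD_contains (nb c : Int) :
    ∀ (l : List (Int × PySem.Dict Int Int)), (l.map Prod.fst).Nodup →
    l.any (fun p => p.1 == c && p.2.contains nb)
      = ((PySem.Dict.mk l).getD c PySem.Dict.empty).contains nb := by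
  intro l
  induction l with
  | nil =>
    intro _
    simp [PySem.Dict.getD_eq_get?_getD, PySem.Dict.get?, PySem.Dict.contains_empty]
  | cons p l ih =>
    intro hnd
    rw [List.map_cons, List.nodup_cons] at hnd
    simp only [List.any_cons]
    rw [PySem.Dict.getD_eq_get?_getD, PySem.Dict.get?_mk_cons]
    by_cases hk : p.1 = c
    · rw [if_pos (by simp [hk])]
      have hrest : l.any (fun q => q.1 == c && q.2.contains nb) = false := by
        rw [List.any_eq_false]
        intro q hq
        have : q.1 ≠ c := by
          intro h
          exact hnd.1 (by rw [hk, ← h]; exact List.mem_map.mpr ⟨q, hq, rfl⟩)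
        simp [this]
      simp [hk, hrest]
    · rw [if_neg (by simp [hk])]
      rw [← PySem.Dict.getD_eq_get?_getD, ← ih hnd.2]
      simp [hk]

theorem pv_inv_getD_contains (ctwd : PySem.Dict Int (PySem.Dict Int Int)) (hnd : ctwd.keys.Nodup) (nb c : Int) :
    ((pvInv ctwd).getD nb PySem.Dict.empty).contains c = (ctwd.getD c PySem.Dict.empty).contains nb := by
  unfold pvInv
  rw [pv_inv_contains_fold]
  have hmk : PySem.Dict.mk ctwd.items = ctwd := by cases ctwd; rfl
  rw [pv_any_eq_getD_contains nb c ctwd.items (by simpa [PySem.Dict.keys] using hnd), hmk]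
  simp

-- one neighbor's contribution to the pair list, restricted to key c
theorem pv_block (c nb : Int) (q : Int → Bool) (hq : q c = true) :
    ∀ (cs : List Int), cs.Nodup →
    (((cs.filter q).map (fun c' => (c', nb))).filter (fun p => p.1 == c)).map Prod.snd
      = if c ∈ cs then [nb] else [] := by
  intro cs
  induction cs with
  | nil => intro _; simp
  | cons x cs ih =>
    intro hnd
    rw [List.nodup_cons] at hnd
    by_cases hx : x = c
    · subst hx
      rw [List.filter_cons_of_pos hq]
      simp only [List.map_cons]
      rw [List.filter_cons_of_pos (by simp)]
      simp only [List.map_cons]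
      have hrest := ih hnd.2
      rw [if_neg hnd.1] at hrest
      rw [hrest]
      simp
    · have hne : ¬ c = x := fun h => hx h.symm
      have hmem : (c ∈ x :: cs ↔ c ∈ cs) := by simp [List.mem_cons, hne]
      cases hqx : q x
      · rw [List.filter_cons_of_neg (by simp [hqx])]
        rw [ih hnd.2, if_congr hmem rfl rfl]
      · rw [List.filter_cons_of_pos hqx]
        simp only [List.map_cons]
        rw [List.filter_cons_of_neg (by simp [hx])]
        rw [ih hnd.2, if_congr hmem rfl rfl]

-- the bucket of context c collects exactly the matching neighbors, in order
theorem pv_pairs_filter (inv : PySem.Dict Int (PySem.Dict Int Int)) (wtc : PySem.Dict Int Int) (c : Int)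
    (hc : wtc.contains c = true) (hnod : ∀ nb, (((inv.getD nb PySem.Dict.empty)).keys).Nodup) :
    ∀ (nbs : List Int),
    ((pvPairs inv wtc nbs).filter (fun p => p.1 == c)).map Prod.snd
      = nbs.filter (fun nb => (inv.getD nb PySem.Dict.empty).contains c) := by
  intro nbs
  induction nbs with
  | nil => simp [pvPairs]
  | cons nb nbs ih =>
    simp only [pvPairs, List.flatMap_cons, List.filter_append, List.map_append] at *
    rw [pv_block c nb (fun c' => wtc.contains c') hc ((inv.getD nb PySem.Dict.empty).keys) (hnod nb), ih]
    rw [List.filter_cons]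
    by_cases hmem : (inv.getD nb PySem.Dict.empty).contains c = true
    · rw [if_pos ((PySem.Dict.contains_iff_mem_keys _ _).mp hmem), if_pos (by simp [hmem])]
      rfl
    · rw [if_neg (fun h => hmem ((PySem.Dict.contains_iff_mem_keys _ _).mpr h)),
        if_neg (by simpa using hmem)]
      rfl

-- B's row equals A's row, word by word
theorem pv_rowB_eq (ctwd : PySem.Dict Int (PySem.Dict Int Int)) (hnd : ctwd.keys.Nodup)
    (wtc : PySem.Dict Int Int) (nbs : List Int) (minc : Int) :
    pvRowB (pvInv ctwd) wtc nbs minc = wtc.keys.foldl (pvRowStep ctwd nbs minc) PySem.Dict.empty := by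
  unfold pvRowB
  apply PySem.List.foldl_congr_mem
  intro r c hcmem
  have hc : wtc.contains c = true := (PySem.Dict.contains_iff_mem_keys _ _).mpr hcmem
  have hacc : ((pvPairs (pvInv ctwd) wtc nbs).foldl
      (fun d p => d.modify p.1 [] (fun l => l ++ [p.2])) PySem.Dict.empty).getD c []
      = pvMatched ctwd nbs c := by
    rw [PySem.Dict.getD_foldl_modify_append]
    rw [PySem.Dict.getD_empty, List.nil_append]
    rw [pv_pairs_filter (pvInv ctwd) wtc c hc (pv_inv_nodup ctwd) nbs]
    unfold pvMatched
    apply List.filter_congr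
    intro nb _
    rw [pv_inv_getD_contains ctwd hnd nb c]
  rw [hacc]
  rfl

-- B's second-pass step is A's second-pass step
theorem pv_impB_eq_impA : pvBstepImp = pvAstepImp := by
  funext ctwd minc w I c
  unfold pvBstepImp pvAstepImp
  rw [pv_setdefault_eq]

theorem compute_WordToSharedContextsOfNeighbors_spec : Claim_equal_compute_WordToSharedContextsOfNeighbors := by
  unfold Claim_equal_compute_WordToSharedContextsOfNeighbors
  intro n WTC WTN CTW nNeighbors minc _ _
  unfold Spec_compute_WordToSharedContextsOfNeighbors
  simp only [compute_WordToSharedContextsOfNeighbors, compute_WordToSharedContextsOfNeighbors_alt]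
  have hctx : ∀ w, (((pvToD2 WTC).getD w PySem.Dict.empty).keys).Nodup := pv_nodup_inner WTC
  have hndC : (pvToD2 CTW).keys.Nodup := PySem.Dict.nodup_keys_ofList _
  have hrow : ∀ w, pvRowB (pvInv (pvToD2 CTW)) ((pvToD2 WTC).getD w PySem.Dict.empty)
      ((PySem.Dict.ofList WTN : PySem.Dict Int (List Int)).getD w []) minc
      = pvRowOf (pvToD2 WTC) (pvToD2 CTW) (PySem.Dict.ofList WTN) minc w := by
    intro w
    rw [pv_rowB_eq (pvToD2 CTW) hndC]
    rfl
  rw [pv_pass1_eq _ _ _ _ hctx]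
  simp only [hrow, pv_impB_eq_impA]
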